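-- pv_equiv track=rewrite | github.com/TRI-DataProjects/data-pull-tools | InferIndex/InferIndex.py | _index_columns_from_repeat_columns
-- ===== SOURCE A (Python) =====
-- from collections import defaultdict
--
-- def _index_columns_from_repeat_columns(cols_list: list) -> list[int]:
--     index_cols: list[int] = list()
--
--     # Tally column names
--     tally = defaultdict(int)
--     for item in cols_list:
--         tally[item] += 1
--
--         # Append the locations with only one item
--     for col, count in tally.items():
--         if count == 1:
--             index_cols.append(col)
--
--     return index_cols
-- ===== SOURCE B (Python) =====
-- def _index_columns_from_repeat_columns(cols_list: list) -> list[int]: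
--     # Sort-based: sort a copy, values equal to their adjacent neighbour in the
--     # sorted order are exactly the repeated ones; keep the others, in the
--     # original order.  No counting table is built.
--     s = sorted(cols_list)
--     repeated = {a for a, b in zip(s, s[1:]) if a == b}
--     return [c for c in cols_list if c not in repeated]
-- ===== Notes on version B (the rewrite author's own statement) =====
-- stated objective: alternative
-- what changed: Replaces the tally-dict build plus second scan over dict items with a sort-based approach: sort a copy, collect the values equal to their adjacent neighbour in sorted order as the repeated set, and filter the original list; no counting table is built.
import Mathlib
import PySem

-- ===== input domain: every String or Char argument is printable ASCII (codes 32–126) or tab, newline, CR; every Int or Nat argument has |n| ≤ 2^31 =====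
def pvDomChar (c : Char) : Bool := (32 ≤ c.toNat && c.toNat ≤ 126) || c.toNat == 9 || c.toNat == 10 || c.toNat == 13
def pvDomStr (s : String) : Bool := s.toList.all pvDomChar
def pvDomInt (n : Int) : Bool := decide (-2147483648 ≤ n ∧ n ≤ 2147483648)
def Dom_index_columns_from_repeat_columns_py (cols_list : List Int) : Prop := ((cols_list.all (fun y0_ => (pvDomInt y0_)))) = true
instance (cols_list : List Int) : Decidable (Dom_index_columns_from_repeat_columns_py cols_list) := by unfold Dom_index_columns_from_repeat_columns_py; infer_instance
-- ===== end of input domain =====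

-- B replaces A's tally-dict build and item scan with sort-then-adjacent-scan
-- (no counting table; objective: alternative, same result, no speed claim).

-- ===== PORT A =====
-- A: tally counts into an insertion-ordered dict, then scan items appending keys with count 1.
def index_columns_from_repeat_columns_py (cols_list : List Int) : List Int :=
  let tally : PySem.Dict Int Int :=
    cols_list.foldl (fun d item => d.modify item 0 (· + 1)) PySem.Dict.empty
  tally.items.foldl (fun acc kv => if kv.2 == 1 then acc ++ [kv.1] else acc) ([] : List Int)

-- ===== PORT B =====
-- B: sort a copy; values equal to an adjacent neighbour in sorted order form
-- the repeated set; keep the elements of the original list not in it.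
def index_columns_from_repeat_columns_py_alt (cols_list : List Int) : List Int :=
  let s := PySem.List.sorted cols_list (fun x => x) false
  let repeated : PySem.Set Int :=
    PySem.Set.ofList
      (((s.zip (PySem.List.slice s (some 1) none)).filter
          (fun p => p.1 == p.2)).map Prod.fst)
  cols_list.filter (fun c => !(PySem.Set.contains repeated c))

-- ===== PRECONDITION & SPEC =====
def Spec_index_columns_from_repeat_columns_py (cols_list : List Int) (out : List Int) : Prop := out = index_columns_from_repeat_columns_py_alt cols_list
instance (cols_list : List Int) (out : List Int) : Decidable (Spec_index_columns_from_repeat_columns_py cols_list out) := by unfold Spec_index_columns_from_repeat_columns_py; infer_instance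

-- ===== CLAIM (what is proved, stated in full; the proofs are below) =====
def Claim_equal_index_columns_from_repeat_columns_py : Prop := ∀ (cols_list : List Int), Dom_index_columns_from_repeat_columns_py cols_list → Spec_index_columns_from_repeat_columns_py cols_list (index_columns_from_repeat_columns_py cols_list)

-- ===== LEMMAS AND PROOFS =====

-- If p only accepts elements occurring at most once in xs, filtering the
-- first-occurrence dedup of xs by p equals filtering xs itself by p.
theorem pv_filter_ofList (xs : List Int) (p : Int → Bool)
    (h : ∀ x, p x = true → xs.count x ≤ 1) :
    List.filter p (PySem.Set.ofList xs) = List.filter p xs := by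
  induction xs with
  | nil => rfl
  | cons x xs ih =>
    have h' : ∀ y, p y = true → xs.count y ≤ 1 := by
      intro y hy
      have := h y hy
      rw [List.count_cons] at this
      split at this <;> omega
    rw [PySem.Set.ofList_cons]
    by_cases hx : p x = true
    · have hc : xs.count x = 0 := by
        have := h x hx
        rw [List.count_cons] at this
        simp at this
        omega
      have hnot : x ∉ PySem.Set.ofList xs := by
        rw [PySem.Set.mem_ofList]
        exact List.count_eq_zero.mp hc
      have hdis : (PySem.Set.ofList xs).discard x = PySem.Set.ofList xs := by
        unfold PySem.Set.discard
        apply List.filter_eq_self.mpr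
        intro y hy
        simp only [Bool.not_eq_eq_eq_not, Bool.not_true, beq_eq_false_iff_ne]
        intro hyx; exact hnot (hyx ▸ hy)
      rw [hdis, List.filter_cons_of_pos hx, List.filter_cons_of_pos hx, ih h']
    · rw [List.filter_cons_of_neg hx, List.filter_cons_of_neg hx]
      unfold PySem.Set.discard
      rw [List.filter_filter]
      have : List.filter (fun y => p y && !(y == x)) (PySem.Set.ofList xs)
           = List.filter p (PySem.Set.ofList xs) := by
        apply List.filter_congr
        intro y _
        by_cases hy : p y = true
        · have hyx : (y == x) = false := by
            by_contra hbe
            have : y = x := by simpa using (Bool.of_not_eq_false hbe)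
            exact hx (this ▸ hy)
          simp [hy, hyx]
        · simp [Bool.eq_false_iff.mpr hy]
      rw [this, ih h']

-- A's port equals the plain "keep elements unique in xs" filter.
theorem pvA_eq_filter (xs : List Int) :
    index_columns_from_repeat_columns_py xs
      = xs.filter (fun c => xs.count c == 1) := by
  unfold index_columns_from_repeat_columns_py
  show (PySem.Dict.counter xs).items.foldl
      (fun acc kv => if kv.2 == 1 then acc ++ [kv.1] else acc) [] = _
  simp only [PySem.List.foldl_append_if]
  rw [PySem.Dict.items_counter, List.filter_map, List.map_map]
  have hpred : ((fun kv : Int × Int => kv.2 == 1) ∘ fun k => (k, (xs.count k : Int)))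
      = fun c => xs.count c == 1 := by
    funext c
    simp only [Function.comp]
    by_cases h : List.count c xs = 1
    · simp [h]
    · have : ((List.count c xs : Int) = 1) = False := by
        simp only [eq_iff_iff, iff_false]
        intro hc; exact h (by exact_mod_cast hc)
      simp [h, this]
  rw [hpred]
  have : List.map ((fun kv : Int × Int => kv.1) ∘ fun k => (k, (xs.count k : Int)))
      (List.filter (fun c => xs.count c == 1) (PySem.Set.ofList xs))
      = List.filter (fun c => xs.count c == 1) (PySem.Set.ofList xs) := by
    simp only [Function.comp_def]
    exact List.map_id' _
  rw [this, List.nil_append]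
  apply pv_filter_ofList
  intro x hx
  simp only [beq_iff_eq] at hx
  omega

-- In a ≤-sorted list, a value heads an adjacent equal pair iff it occurs at least twice.
theorem pv_adj_pairs (s : List Int) (c : Int) (hs : s.Pairwise (fun a b : Int => a ≤ b)) :
    (c ∈ ((s.zip s.tail).filter (fun p => p.1 == p.2)).map Prod.fst) ↔ 2 ≤ s.count c := by
  induction s with
  | nil => simp
  | cons a t ih =>
    cases t with
    | nil =>
      simp only [List.tail_cons, List.zip_nil_right, List.filter_nil, List.map_nil,
        List.not_mem_nil, false_iff, not_le]
      rw [List.count_cons]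
      split <;> simp
    | cons b t' =>
      have h1 := List.pairwise_cons.mp hs
      have ht : (b :: t').Pairwise (fun a b : Int => a ≤ b) := h1.2
      have hab : a ≤ b := h1.1 b (List.mem_cons_self)
      have hbt' : ∀ x ∈ t', b ≤ x := fun x hx => (List.pairwise_cons.mp ht).1 x hx
      have iht := ih ht
      simp only [List.tail_cons] at iht ⊢
      rw [List.zip_cons_cons, List.filter_cons]
      constructor
      · intro hmem
        by_cases hab2 : ((a, b).1 == (a, b).2) = true
        · rw [if_pos hab2] at hmem
          have hb : a = b := by simpa using hab2
          rcases List.mem_map.mp hmem with ⟨p, hp, hpc⟩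
          rcases List.mem_cons.mp hp with h | h
          · have hac : a = c := by rw [h] at hpc; simpa using hpc
            subst hb; subst hac
            rw [List.count_cons_self, List.count_cons_self]
            omega
          · have hmt : c ∈ (((b :: t').zip t').filter (fun p => p.1 == p.2)).map Prod.fst :=
              List.mem_map.mpr ⟨p, h, hpc⟩
            have := iht.mp hmt
            rw [List.count_cons]
            split <;> omega
        · rw [if_neg hab2] at hmem
          have := iht.mp hmem
          rw [List.count_cons]
          split <;> omega
      · intro hcnt
        by_cases hac : a = c
        · have hct : 1 ≤ (b :: t').count c := by
            rw [List.count_cons] at hcnt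
            split at hcnt <;> omega
          have hcmem : c ∈ b :: t' := List.one_le_count_iff.mp hct
          have hbc : b = c := by
            rcases List.mem_cons.mp hcmem with h | h
            · exact h.symm
            · have h2 := hbt' c h
              omega
          have hab2 : ((a, b).1 == (a, b).2) = true := by
            simp [hac, hbc]
          rw [if_pos hab2]
          exact List.mem_map.mpr ⟨(a, b), List.mem_cons_self, hac⟩
        · have hct2 : 2 ≤ (b :: t').count c := by
            rw [List.count_cons] at hcnt
            have haf : (a == c) = false := by simpa using hac
            rw [haf] at hcnt
            simp at hcnt
            omega
          have hmem := iht.mpr hct2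
          rcases List.mem_map.mp hmem with ⟨p, hp, hpc⟩
          split
          · exact List.mem_map.mpr ⟨p, List.mem_cons_of_mem _ hp, hpc⟩
          · exact List.mem_map.mpr ⟨p, hp, hpc⟩

-- B's sort-and-scan equals the same "count = 1" filter.
theorem pvB_eq_filter (xs : List Int) :
    index_columns_from_repeat_columns_py_alt xs
      = xs.filter (fun c => xs.count c == 1) := by
  unfold index_columns_from_repeat_columns_py_alt
  simp only [PySem.List.slice_from_one]
  apply List.filter_congr
  intro c hc
  have hpair : (PySem.List.sorted xs (fun x => x) false).Pairwise (fun a b : Int => a ≤ b) :=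
    PySem.List.sorted_pairwise xs (fun x => x)
  have hperm : (PySem.List.sorted xs (fun x => x) false).Perm xs :=
    PySem.List.sorted_perm xs (fun x => x) false
  have hadj := pv_adj_pairs (PySem.List.sorted xs (fun x => x) false) c hpair
  rw [hperm.count_eq c] at hadj
  have hone : 1 ≤ xs.count c := List.one_le_count_iff.mpr hc
  by_cases h2 : 2 ≤ xs.count c
  · have hmem := (PySem.Set.mem_ofList _ _).mpr (hadj.mpr h2)
    have hct := (PySem.Set.contains_iff _ _).mpr hmem
    rw [hct]
    have hne : xs.count c ≠ 1 := by omega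
    simpa using hne
  · have hct : PySem.Set.contains
        (PySem.Set.ofList
          ((((PySem.List.sorted xs (fun x => x) false).zip
              (PySem.List.sorted xs (fun x => x) false).tail).filter
            (fun p => p.1 == p.2)).map Prod.fst)) c = false :=
      Bool.eq_false_iff.mpr
        (fun h => h2 (hadj.mp ((PySem.Set.mem_ofList _ _).mp
          ((PySem.Set.contains_iff _ _).mp h))))
    rw [hct]
    have heq : xs.count c = 1 := by omega
    simpa using heq

-- ===== VERDICT (by name: the statement is the Claim_ definition above) =====
theorem index_columns_from_repeat_columns_py_spec : Claim_equal_index_columns_from_repeat_columns_py := by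
  intro xs _
  unfold Spec_index_columns_from_repeat_columns_py
  rw [pvA_eq_filter, pvB_eq_filter]
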